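-- pv_equiv track=rewrite | github.com/miclaldogan/bantz | src/bantz/router/engine.py | _parse_browser_info_text
-- ===== SOURCE A (Python) =====
-- from typing import Optional, Callable, Awaitable
--
-- def _parse_browser_info_text(text: str) -> tuple[Optional[str], Optional[str]]:
--     """Parse browser_info output into (title, url)."""
--     if not text:
--         return None, None
--
--     title = None
--     url = None
--     for raw in str(text).splitlines():
--         line = raw.strip()
--         if not line:
--             continue
--         if line.lower().startswith("sayfa:"):
--             title = line.split(":", 1)[1].strip() if ":" in line else None
--         if line.lower().startswith("url:"):
--             url = line.split(":", 1)[1].strip() if ":" in line else None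
--     return title, url
-- ===== SOURCE B (Python) =====
-- def _parse_browser_info_text(text: str) -> tuple:
--     """Parse browser_info output into (title, url).
--
--     Scans the lines in reverse, filling each field from the last matching
--     line and stopping as soon as both fields are known.
--     """
--     if not text:
--         return None, None
--
--     title = None
--     url = None
--     for raw in reversed(str(text).splitlines()):
--         line = raw.strip()
--         if not line:
--             continue
--         low = line.lower()
--         if title is None and low.startswith("sayfa:"):
--             title = line.split(":", 1)[1].strip()
--         if url is None and low.startswith("url:"):
--             url = line.split(":", 1)[1].strip()
--         if title is not None and url is not None:
--             break
--     return title, url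
-- ===== Notes on version B (the rewrite author's own statement) =====
-- stated objective: alternative
-- what changed: Instead of scanning all lines forwards and overwriting the fields on every match, B scans the lines in reverse, fills each still-empty field from the first match it meets (= A's last match) and breaks as soon as both fields are set.
import Mathlib
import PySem

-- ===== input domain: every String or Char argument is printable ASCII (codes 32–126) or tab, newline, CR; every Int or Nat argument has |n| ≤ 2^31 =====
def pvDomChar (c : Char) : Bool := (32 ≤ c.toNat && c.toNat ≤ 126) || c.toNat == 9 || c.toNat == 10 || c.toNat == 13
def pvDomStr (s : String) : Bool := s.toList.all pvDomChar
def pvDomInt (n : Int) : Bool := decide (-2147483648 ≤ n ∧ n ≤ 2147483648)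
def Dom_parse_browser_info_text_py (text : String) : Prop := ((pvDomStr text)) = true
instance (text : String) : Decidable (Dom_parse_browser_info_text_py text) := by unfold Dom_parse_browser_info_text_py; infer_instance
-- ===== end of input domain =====

-- B scans the lines in reverse, filling each still-empty field from the first
-- match it meets (= A's last match) and stopping once both are set; same values
-- as A's forward overwrite scan (objective: alternative decomposition).

-- ===== PORT A =====
-- shared helper: line.split(":", 1)[1].strip()  (both Pythons contain this
-- exact expression; the .getD defaults are unreachable, since it is only
-- evaluated when ':' occurs in line, so splitMax? yields ≥ 2 parts)
def pvAfterColon (line : String) : String :=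
  PySem.Str.strip (((PySem.Str.splitMax? line ":" 1).getD []).getD 1 "")

-- the body of A's for-loop, as a fold step over (title, url)
def pvStepA (s : Option String × Option String) (raw : String) :
    Option String × Option String :=
  let line := PySem.Str.strip raw
  if line = "" then s
  else
    ( if PySem.Str.startswith (PySem.Str.lower line) "sayfa:" then
        (if PySem.Str.isIn ":" line then some (pvAfterColon line) else none)
      else s.1,
      if PySem.Str.startswith (PySem.Str.lower line) "url:" then
        (if PySem.Str.isIn ":" line then some (pvAfterColon line) else none)
      else s.2 )

def parse_browser_info_text_py (text : String) : Option String × Option String :=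
  if text = "" then (none, none)
  else (PySem.Str.splitlines text).foldl pvStepA (none, none)

-- ===== PORT B =====
-- B's reversed loop with its early break, as a recursion over the line list
def pvGoB : List String → Option String → Option String → Option String × Option String
  | [], t, u => (t, u)
  | raw :: rest, t, u =>
    let line := PySem.Str.strip raw
    if line = "" then pvGoB rest t u
    else
      let low := PySem.Str.lower line
      let t' := if t = none ∧ PySem.Str.startswith low "sayfa:" then some (pvAfterColon line) else t
      let u' := if u = none ∧ PySem.Str.startswith low "url:" then some (pvAfterColon line) else u
      if t'.isSome ∧ u'.isSome then (t', u') else pvGoB rest t' u'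

def parse_browser_info_text_py_alt (text : String) : Option String × Option String :=
  if text = "" then (none, none)
  else pvGoB (PySem.Str.splitlines text).reverse none none

-- ===== PRECONDITION & SPEC =====
def Spec_parse_browser_info_text_py (text : String) (out : Option String × Option String) : Prop := out = parse_browser_info_text_py_alt text
instance (text : String) (out : Option String × Option String) : Decidable (Spec_parse_browser_info_text_py text out) := by unfold Spec_parse_browser_info_text_py; infer_instance

-- ===== CLAIM (what is proved, stated in full; the proofs are below) =====
def Claim_equal_parse_browser_info_text_py : Prop := ∀ (text : String), Dom_parse_browser_info_text_py text → Spec_parse_browser_info_text_py text (parse_browser_info_text_py text)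

-- ===== LEMMAS AND PROOFS =====

-- one-field variants used only by the proofs
def pvStepT (t : Option String) (raw : String) : Option String :=
  if PySem.Str.strip raw = "" then t
  else if PySem.Str.startswith (PySem.Str.lower (PySem.Str.strip raw)) "sayfa:" then
    (if PySem.Str.isIn ":" (PySem.Str.strip raw) then some (pvAfterColon (PySem.Str.strip raw)) else none)
  else t

def pvStepU (u : Option String) (raw : String) : Option String :=
  if PySem.Str.strip raw = "" then u
  else if PySem.Str.startswith (PySem.Str.lower (PySem.Str.strip raw)) "url:" then
    (if PySem.Str.isIn ":" (PySem.Str.strip raw) then some (pvAfterColon (PySem.Str.strip raw)) else none)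
  else u

def pvFillT : List String → Option String → Option String
  | [], t => t
  | raw :: rest, t =>
    if PySem.Str.strip raw = "" then pvFillT rest t
    else pvFillT rest
      (if t = none ∧ PySem.Str.startswith (PySem.Str.lower (PySem.Str.strip raw)) "sayfa:" then some (pvAfterColon (PySem.Str.strip raw)) else t)

def pvFillU : List String → Option String → Option String
  | [], u => u
  | raw :: rest, u =>
    if PySem.Str.strip raw = "" then pvFillU rest u
    else pvFillU rest
      (if u = none ∧ PySem.Str.startswith (PySem.Str.lower (PySem.Str.strip raw)) "url:" then some (pvAfterColon (PySem.Str.strip raw)) else u)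

-- lowercasing maps no character to ':'
lemma pvLowerChar_eq_colon {c : Char} (h : PySem.Chars.lowerChar c = ':') : c = ':' := by
  unfold PySem.Chars.lowerChar PySem.Chars.isupper at h
  split_ifs at h with hu
  · exfalso
    simp only [Bool.and_eq_true, decide_eq_true_eq, Char.le_def, UInt32.le_iff_toNat_le] at hu
    have h1 : 65 ≤ c.toNat := hu.1
    have h2 : c.toNat ≤ 90 := hu.2
    have h3 := congrArg Char.toNat h
    rw [Char.toNat_ofNat, if_pos (Or.inl (by omega : c.toNat + 32 < 0xD800))] at h3
    have h4 : c.toNat + 32 = 58 := by simpa using h3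
    omega
  · exact h

-- a line whose lowercase starts with a colon-containing prefix contains ':'
lemma pvColon_of_startswith (line : String) (p : String) (hp : ':' ∈ p.toList)
    (h : PySem.Str.startswith (PySem.Str.lower line) p = true) :
    PySem.Str.isIn ":" line = true := by
  rw [PySem.Str.isIn_iff_infix]
  have hcol : (":" : String).toList = [':'] := rfl
  rw [hcol, List.singleton_infix_iff]
  have h' : p.toList <+: (PySem.Str.lower line).toList := by
    rw [PySem.Str.startswith_eq] at h
    exact (PySem.Chars.startswith_iff _ _).mp h
  rw [PySem.Str.toList_lower] at h'
  have hmem : ':' ∈ PySem.Chars.lower line.toList := h'.subset hp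
  unfold PySem.Chars.lower at hmem
  rcases List.mem_map.mp hmem with ⟨c, hc, hcl⟩
  exact (pvLowerChar_eq_colon hcl) ▸ hc

-- A's fold step acts componentwise
lemma pvStepA_pair (s : Option String × Option String) (x : String) :
    pvStepA s x = (pvStepT s.1 x, pvStepU s.2 x) := by
  unfold pvStepA pvStepT pvStepU
  by_cases h : PySem.Str.strip x = "" <;> simp [h]

lemma pvFoldA_eq (l : List String) : ∀ (s : Option String × Option String),
    l.foldl pvStepA s = (l.foldl pvStepT s.1, l.foldl pvStepU s.2) := by
  induction l with
  | nil => intro s; rfl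
  | cons x xs ih =>
    intro s
    simp only [List.foldl_cons, pvStepA_pair]
    exact ih _

-- once a field is set, pvFill leaves it alone
lemma pvFillT_some (r : List String) (v : String) : pvFillT r (some v) = some v := by
  induction r with
  | nil => rfl
  | cons x xs ih => simp [pvFillT, ih]

lemma pvFillU_some (r : List String) (v : String) : pvFillU r (some v) = some v := by
  induction r with
  | nil => rfl
  | cons x xs ih => simp [pvFillU, ih]

-- B's loop (with its break) acts componentwise as pvFillT/pvFillU
lemma pvGoB_eq (r : List String) : ∀ (t u : Option String),
    pvGoB r t u = (pvFillT r t, pvFillU r u) := by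
  induction r with
  | nil => intro t u; rfl
  | cons x xs ih =>
    intro t u
    simp only [pvGoB, pvFillT, pvFillU]
    split
    · exact ih t u
    · set t' := if t = none ∧ PySem.Str.startswith (PySem.Str.lower (PySem.Str.strip x)) "sayfa:" then some (pvAfterColon (PySem.Str.strip x)) else t with ht'
      set u' := if u = none ∧ PySem.Str.startswith (PySem.Str.lower (PySem.Str.strip x)) "url:" then some (pvAfterColon (PySem.Str.strip x)) else u with hu'
      split
      · next hb =>
        rcases Option.isSome_iff_exists.mp hb.1 with ⟨v, hv⟩
        rcases Option.isSome_iff_exists.mp hb.2 with ⟨w, hw⟩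
        rw [hv, hw, pvFillT_some, pvFillU_some]
      · exact ih t' u'

-- core: forward overwrite from none = reverse first-fill from none
lemma pvT_rev (l : List String) : l.foldl pvStepT none = pvFillT l.reverse none := by
  induction l using List.reverseRecOn with
  | nil => rfl
  | append_singleton l x ih =>
    rw [List.foldl_append, List.foldl_cons, List.foldl_nil, List.reverse_append,
        List.reverse_singleton, List.singleton_append]
    simp only [pvStepT, pvFillT]
    by_cases hl : PySem.Str.strip x = ""
    · rw [if_pos hl, if_pos hl, ih]
    · rw [if_neg hl, if_neg hl]
      by_cases hsw : PySem.Str.startswith (PySem.Str.lower (PySem.Str.strip x)) "sayfa:" = true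
      · have hcol := pvColon_of_startswith (PySem.Str.strip x) "sayfa:" (by decide) hsw
        rw [if_pos hsw, if_pos hcol, if_pos ⟨trivial, hsw⟩, pvFillT_some]
      · rw [if_neg hsw, if_neg (fun hcon => hsw hcon.2), ih]

lemma pvU_rev (l : List String) : l.foldl pvStepU none = pvFillU l.reverse none := by
  induction l using List.reverseRecOn with
  | nil => rfl
  | append_singleton l x ih =>
    rw [List.foldl_append, List.foldl_cons, List.foldl_nil, List.reverse_append,
        List.reverse_singleton, List.singleton_append]
    simp only [pvStepU, pvFillU]
    by_cases hl : PySem.Str.strip x = ""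
    · rw [if_pos hl, if_pos hl, ih]
    · rw [if_neg hl, if_neg hl]
      by_cases hsw : PySem.Str.startswith (PySem.Str.lower (PySem.Str.strip x)) "url:" = true
      · have hcol := pvColon_of_startswith (PySem.Str.strip x) "url:" (by decide) hsw
        rw [if_pos hsw, if_pos hcol, if_pos ⟨trivial, hsw⟩, pvFillU_some]
      · rw [if_neg hsw, if_neg (fun hcon => hsw hcon.2), ih]

-- ===== VERDICT (by name: the statement is the Claim_ definition above) =====
theorem parse_browser_info_text_py_spec : Claim_equal_parse_browser_info_text_py := by
  intro text _
  unfold Spec_parse_browser_info_text_py parse_browser_info_text_py parse_browser_info_text_py_alt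
  by_cases h : text = ""
  · simp [h]
  · rw [if_neg h, if_neg h, pvFoldA_eq, pvGoB_eq, pvT_rev, pvU_rev]
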